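-- pv_equiv track=rewrite | github.com/Michael14567/Signal | mian.py | generate_cyclic_code
-- ===== SOURCE A (Python) =====
-- def poly_degree(poly):
--     if poly == 0:
--         return -1
--     return poly.bit_length() - 1
--
-- def poly_mul(a, b):
--     """
--     Умножение многочленов над GF(2).
--     Бит i соответствует коэффициенту при x^i.
--     """
--     result = 0
--     shift = 0
--
--     while b:
--         if b & 1:
--             result ^= a << shift
--
--         b >>= 1
--         shift += 1
--
--     return result
--
-- def int_to_codeword(value, length):
--     return tuple((value >> i) & 1 for i in range(length))
--
-- def generate_cyclic_code(generator, n):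
--     r = poly_degree(generator)
--     k = n - r
--
--     codewords = []
--
--     for message in range(2 ** k):
--         codeword_poly = poly_mul(message, generator)
--         codewords.append(int_to_codeword(codeword_poly, n))
--
--     return sorted(set(codewords))
-- ===== SOURCE B (Python) =====
-- def generate_cyclic_code(generator, n):
--     r = generator.bit_length() - 1 if generator != 0 else -1
--     k = n - r
--     span = {0}
--     for j in range(k):
--         shifted = generator << j
--         span = span | {c ^ shifted for c in span}
--     return sorted(tuple((c >> i) & 1 for i in range(n)) for c in span)
-- ===== Notes on version B (the rewrite author's own statement) =====
-- stated objective: alternative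
-- what changed: B replaces A's per-message carry-less multiplication (2^k products, each looping over the generator's bits) by an incremental linear-span construction that doubles a set of codeword integers once per basis shift g<<j and converts each codeword to a bit tuple only once; the final sort is unchanged.
import Mathlib
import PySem

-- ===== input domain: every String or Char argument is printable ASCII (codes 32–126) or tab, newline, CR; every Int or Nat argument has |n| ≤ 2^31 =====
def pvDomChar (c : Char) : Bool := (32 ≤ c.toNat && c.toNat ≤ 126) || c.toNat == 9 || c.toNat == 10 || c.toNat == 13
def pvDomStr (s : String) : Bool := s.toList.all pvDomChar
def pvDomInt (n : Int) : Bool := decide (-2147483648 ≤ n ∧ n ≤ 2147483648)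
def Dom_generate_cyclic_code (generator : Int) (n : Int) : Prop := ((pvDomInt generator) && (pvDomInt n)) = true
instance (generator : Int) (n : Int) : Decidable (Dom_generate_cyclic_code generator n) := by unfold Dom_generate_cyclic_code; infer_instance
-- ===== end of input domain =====

-- ===== PORT A =====
-- A enumerates all 2^k messages and multiplies each by the generator; B instead doubles a
-- span set along the basis g<<j and sorts once: an alternative construction (same final sort).
-- poly_degree(poly)
def pvPolyDegree (poly : Int) : Int :=
  if poly = 0 then -1 else (PySem.Int.bitLength poly : Int) - 1

-- poly_mul's while-loop (result/shift accumulators). A only calls it with nonnegative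
-- arguments under Pre_ (for b < 0 the Python loop never terminates, excluded by Pre_).
def pvPolyMulGo (a b result shift : Nat) : Nat :=
  if b = 0 then result
  else pvPolyMulGo a (b >>> 1) (if b &&& 1 = 1 then result ^^^ (a <<< shift) else result) (shift + 1)
termination_by b
decreasing_by simp [Nat.shiftRight_eq_div_pow]; omega

def pvPolyMul (a b : Nat) : Nat := pvPolyMulGo a b 0 0

-- int_to_codeword(value, length)
def pvIntToCodeword (value : Nat) (length : Int) : List Int :=
  (List.range length.toNat).map (fun i => (((value >>> i) &&& 1 : Nat) : Int))

def generate_cyclic_code (generator : Int) (n : Int) : List (List Int) :=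
  let r := pvPolyDegree generator
  let k := n - r
  let codewords := (List.range (2 ^ k.toNat)).map
    (fun message => pvIntToCodeword (pvPolyMul message generator.toNat) n)
  PySem.List.sorted (PySem.Set.ofList codewords) (fun t => t) false

-- ===== PORT B =====
-- span | {c ^ shifted for c in span}   (one step of Source B's loop)
def pvSpanStep (g : Nat) (span : List Nat) (j : Nat) : List Nat :=
  PySem.Set.union span (span.map (fun c => c ^^^ (g <<< j)))

-- the loop 'for j in range(k): span = span | {...}' starting from {0}
def pvSpan (g k : Nat) : List Nat :=
  (List.range k).foldl (pvSpanStep g) (PySem.Set.ofList [0])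

-- tuple((c >> i) & 1 for i in range(n))
def pvBits (c : Nat) (n : Int) : List Int :=
  (List.range n.toNat).map (fun i => (((c >>> i) &&& 1 : Nat) : Int))

def generate_cyclic_code_alt (generator : Int) (n : Int) : List (List Int) :=
  let r : Int := if generator ≠ 0 then (PySem.Int.bitLength generator : Int) - 1 else -1
  let k := n - r
  PySem.List.sorted ((pvSpan generator.toNat k.toNat).map (fun c => pvBits c n)) (fun t => t) false

-- ===== PRECONDITION & SPEC =====
-- Pre_ excludes generator < 0 (poly_mul's 'while b: b >>= 1' never terminates there, so A
-- never returns) and n < deg(generator) (A raises TypeError: 2**k is a float for k < 0).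
def Pre_generate_cyclic_code (generator : Int) (n : Int) : Prop :=
  0 ≤ generator ∧ pvPolyDegree generator ≤ n
instance (generator : Int) (n : Int) : Decidable (Pre_generate_cyclic_code generator n) := by
  unfold Pre_generate_cyclic_code; infer_instance

def pvWitness_generate_cyclic_code : Int × Int := (11, 6)

def Spec_generate_cyclic_code (generator : Int) (n : Int) (out : List (List Int)) : Prop :=
  out = generate_cyclic_code_alt generator n
instance (generator : Int) (n : Int) (out : List (List Int)) :
    Decidable (Spec_generate_cyclic_code generator n out) := by
  unfold Spec_generate_cyclic_code; infer_instance

-- ===== CLAIM (what is proved, stated in full; the proofs are below) =====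
def Claim_equal_generate_cyclic_code : Prop := ∀ (generator : Int) (n : Int), Dom_generate_cyclic_code generator n → Pre_generate_cyclic_code generator n → Spec_generate_cyclic_code generator n (generate_cyclic_code generator n)

-- ===== LEMMAS AND PROOFS =====

-- Carry-less (GF(2)[x]) product, recursing on the bits of the FIRST argument; the common
-- mathematical description both ports are reduced to.
def pvClmul (m g : Nat) : Nat :=
  if m = 0 then 0 else (if m % 2 = 1 then g else 0) ^^^ 2 * pvClmul (m / 2) g
termination_by m
decreasing_by omega

theorem pvTwoMulXor (a b : Nat) : 2 * a ^^^ 2 * b = 2 * (a ^^^ b) := by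
  have := (@Nat.shiftLeft_xor_distrib 1 a b).symm
  simpa [Nat.shiftLeft_eq, Nat.mul_comm] using this

theorem pvShiftSucc (g j : Nat) : 2 * (g <<< j) = g <<< (j + 1) := by
  simp [Nat.shiftLeft_eq, Nat.pow_succ]; ring

theorem pvTwoMulXorOne (a : Nat) : 2 * a ^^^ 1 = 2 * a + 1 := by
  apply Nat.eq_of_testBit_eq
  intro i
  cases i with
  | zero => simp [Nat.testBit_zero]
  | succ j => simp [Nat.testBit_succ]

-- the defining equation of pvClmul, valid also at m = 0
theorem pvClmul_eq (m g : Nat) :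
    pvClmul m g = (if m % 2 = 1 then g else 0) ^^^ 2 * pvClmul (m / 2) g := by
  by_cases h : m = 0
  · simp [h, pvClmul]
  · rw [pvClmul]; simp [h]

theorem pvClmul_zero_left (g : Nat) : pvClmul 0 g = 0 := by simp [pvClmul]

theorem pvClmul_step_right (m g : Nat) :
    pvClmul m g = (if g % 2 = 1 then m else 0) ^^^ 2 * pvClmul m (g / 2) := by
  induction m using Nat.strong_induction_on with
  | _ m ih =>
    by_cases hm : m = 0
    · simp [hm, pvClmul_zero_left]
    · rw [pvClmul_eq m g, pvClmul_eq m (g / 2), ih (m / 2) (by omega)]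
      rcases Nat.mod_two_eq_zero_or_one m with hm2 | hm2 <;>
        rcases Nat.mod_two_eq_zero_or_one g with hg2 | hg2
      · simp [hm2, hg2]
      · -- m even, g odd
        obtain ⟨m', rfl⟩ : ∃ m', m = 2 * m' := ⟨m / 2, by omega⟩
        simp only [hm2, hg2]
        simp [← pvTwoMulXor]
      · -- m odd, g even
        obtain ⟨g', rfl⟩ : ∃ g', g = 2 * g' := ⟨g / 2, by omega⟩
        simp only [hm2, hg2]
        simp [← pvTwoMulXor]
      · -- both odd
        obtain ⟨m', hm'⟩ : ∃ m', m = 2 * m' + 1 := ⟨m / 2, by omega⟩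
        obtain ⟨g', hg'⟩ : ∃ g', g = 2 * g' + 1 := ⟨g / 2, by omega⟩
        subst hm' hg'
        simp only [hm2, hg2, Nat.mul_add_div (by omega : 0 < 2)]
        simp [← pvTwoMulXor]
        rw [← pvTwoMulXorOne g', ← pvTwoMulXorOne m']
        ac_rfl

theorem pvClmul_zero_right (m : Nat) : pvClmul m 0 = 0 := by
  have h := pvClmul_step_right m 0
  simp at h; omega

theorem pvClmul_comm (m g : Nat) : pvClmul m g = pvClmul g m := by
  induction g using Nat.strong_induction_on with
  | _ g ih =>
    by_cases hg : g = 0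
    · simp [hg, pvClmul_zero_left, pvClmul_zero_right]
    · rw [pvClmul_step_right m g, ih (g / 2) (by omega), pvClmul_eq g m]

theorem pvShiftSucc' (x s : Nat) : (2 * x) <<< s = x <<< (s + 1) := by
  simp [Nat.shiftLeft_eq, Nat.pow_succ]; ring

theorem pvPolyMulGo_eq (b a res s : Nat) :
    pvPolyMulGo a b res s = res ^^^ (pvClmul b a) <<< s := by
  induction b using Nat.strong_induction_on generalizing res s with
  | _ b ih =>
    rw [pvPolyMulGo]
    by_cases hb : b = 0
    · simp [hb, pvClmul_zero_left]
    · rw [if_neg hb,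
        ih (b >>> 1) (by simp [Nat.shiftRight_eq_div_pow]; omega),
        pvClmul_eq b a]
      have hb1 : b >>> 1 = b / 2 := by simp [Nat.shiftRight_eq_div_pow]
      rw [hb1, Nat.and_one_is_mod]
      rw [Nat.shiftLeft_xor_distrib, pvShiftSucc']
      rcases Nat.mod_two_eq_zero_or_one b with h2 | h2 <;>
        simp [h2, Nat.xor_assoc]

theorem pvPolyMul_eq (a b : Nat) : pvPolyMul a b = pvClmul b a := by
  simpa [pvPolyMul] using pvPolyMulGo_eq b a 0 0

theorem pvClmul_add_pow (j : Nat) : ∀ m g : Nat, m < 2 ^ j →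
    pvClmul (m + 2 ^ j) g = pvClmul m g ^^^ g <<< j := by
  induction j with
  | zero =>
    intro m g hm
    interval_cases m
    simp only [Nat.zero_add, pow_zero]
    rw [pvClmul_eq 1 g]
    simp [pvClmul_zero_left]
  | succ j ihj =>
    intro m g hm
    have e : 2 ^ (j + 1) = 2 * 2 ^ j := by rw [Nat.pow_succ]; ring
    rw [pvClmul_eq (m + 2 ^ (j + 1)) g, pvClmul_eq m g]
    have h2 : (m + 2 ^ (j + 1)) % 2 = m % 2 := by omega
    have h3 : (m + 2 ^ (j + 1)) / 2 = m / 2 + 2 ^ j := by omega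
    rw [h2, h3, ihj (m / 2) g (by omega), ← pvTwoMulXor, pvShiftSucc, Nat.xor_assoc]

theorem pvClmul_lt (m : Nat) : ∀ g k sz : Nat, 1 ≤ sz → m < 2 ^ k → g < 2 ^ sz →
    pvClmul m g < 2 ^ (k + sz - 1) := by
  induction m using Nat.strong_induction_on with
  | _ m ih =>
    intro g k sz hsz hm hg
    by_cases h0 : m = 0
    · simp [h0, pvClmul_zero_left]
    · have hk : 1 ≤ k := by
        rcases Nat.eq_zero_or_pos k with h | h
        · rw [h] at hm; omega
        · exact h
      have ek : 2 ^ k = 2 ^ (k - 1) * 2 := by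
        conv_lhs => rw [show k = (k - 1) + 1 by omega]
        rw [Nat.pow_succ]
      have hrec := ih (m / 2) (by omega) g (k - 1) sz hsz (by omega) hg
      rw [pvClmul_eq m g]
      apply Nat.xor_lt_two_pow
      · have hle : g < 2 ^ (k + sz - 1) :=
          lt_of_lt_of_le hg (Nat.pow_le_pow_right (by omega) (by omega))
        split
        · exact hle
        · positivity
      · have e2 : 2 ^ (k + sz - 1) = 2 ^ (k - 1 + sz - 1) * 2 := by
          rw [show k + sz - 1 = (k - 1 + sz - 1) + 1 by omega, Nat.pow_succ]
        omega

theorem pvSpan_succ (g k : Nat) : pvSpan g (k + 1) = pvSpanStep g (pvSpan g k) k := by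
  simp [pvSpan, List.range_succ]

theorem pvSpan_nodup (g k : Nat) : (pvSpan g k).Nodup := by
  induction k with
  | zero => exact PySem.Set.nodup_ofList [0]
  | succ k ih => rw [pvSpan_succ]; exact PySem.Set.nodup_union _ _ ih

theorem pvSpan_mem (g k : Nat) (c : Nat) :
    c ∈ pvSpan g k ↔ ∃ m, m < 2 ^ k ∧ c = pvClmul m g := by
  induction k generalizing c with
  | zero =>
    rw [show pvSpan g 0 = PySem.Set.ofList [0] from rfl, PySem.Set.mem_ofList]
    constructor
    · intro h
      refine ⟨0, by omega, ?_⟩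
      simp at h
      simp [h, pvClmul_zero_left]
    · rintro ⟨m, hm, rfl⟩
      interval_cases m
      simp [pvClmul_zero_left]
  | succ k ih =>
    rw [pvSpan_succ, pvSpanStep, PySem.Set.mem_union]
    have e : 2 ^ (k + 1) = 2 ^ k * 2 := Nat.pow_succ 2 k
    constructor
    · rintro (h | h)
      · obtain ⟨m, hm, rfl⟩ := (ih _).mp h
        exact ⟨m, by omega, rfl⟩
      · obtain ⟨c', hc', rfl⟩ := List.mem_map.mp h
        obtain ⟨m, hm, rfl⟩ := (ih _).mp hc'
        exact ⟨m + 2 ^ k, by omega, (pvClmul_add_pow k m g hm).symm⟩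
    · rintro ⟨m, hm, rfl⟩
      by_cases hlt : m < 2 ^ k
      · exact Or.inl ((ih _).mpr ⟨m, hlt, rfl⟩)
      · refine Or.inr (List.mem_map.mpr ⟨pvClmul (m - 2 ^ k) g, (ih _).mpr ⟨m - 2 ^ k, by omega, rfl⟩, ?_⟩)
        rw [← pvClmul_add_pow k (m - 2 ^ k) g (by omega)]
        congr 1
        omega

theorem pvBits_inj (n : Int) (c d : Nat) (hc : c < 2 ^ n.toNat) (hd : d < 2 ^ n.toNat)
    (h : pvBits c n = pvBits d n) : c = d := by
  apply Nat.eq_of_testBit_eq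
  intro i
  by_cases hi : i < n.toNat
  · have h2 := congrArg (fun l => l[i]?) h
    simp only [pvBits, List.getElem?_map, List.getElem?_range, hi, Option.map_some] at h2
    have h3 : (c >>> i) &&& 1 = (d >>> i) &&& 1 := by
      have := Option.some.inj h2
      exact_mod_cast this
    rw [Nat.and_one_is_mod, Nat.and_one_is_mod, Nat.shiftRight_eq_div_pow,
      Nat.shiftRight_eq_div_pow] at h3
    rw [Nat.testBit_eq_decide_div_mod_eq, Nat.testBit_eq_decide_div_mod_eq, h3]
  · have hle : n.toNat ≤ i := by omega
    rw [Nat.testBit_lt_two_pow (lt_of_lt_of_le hc (Nat.pow_le_pow_right (by omega) hle)),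
      Nat.testBit_lt_two_pow (lt_of_lt_of_le hd (Nat.pow_le_pow_right (by omega) hle))]

theorem pvSorted_congr_perm (xs ys : List (List Int)) (h : xs.Perm ys) :
    PySem.List.sorted xs (fun t => t) false = PySem.List.sorted ys (fun t => t) false := by
  have conv : ∀ zs : List (List Int),
      PySem.List.sorted zs (fun t => t) false
        = @PySem.List.sorted (List Int) (List Int) List.instLinearOrder.toLT
            (@LinearOrder.toDecidableLT _ List.instLinearOrder) zs (fun t => t) false := by
    intro zs
    congr 1
  rw [conv xs, conv ys]
  exact PySem.List.sorted_eq_sorted_of_perm xs ys _ (fun a b hab => hab) h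

-- injectivity of the codeword tuple on the span (all span elements fit in n bits)
theorem pvSpanInj (generator n : Int) (h0 : 0 ≤ generator) (hrn : pvPolyDegree generator ≤ n) :
    ∀ x ∈ pvSpan generator.toNat (n - pvPolyDegree generator).toNat,
      ∀ y ∈ pvSpan generator.toNat (n - pvPolyDegree generator).toNat,
        pvBits x n = pvBits y n → x = y := by
  intro x hx y hy hxy
  obtain ⟨mx, hmx, rfl⟩ := (pvSpan_mem _ _ _).mp hx
  obtain ⟨my, hmy, rfl⟩ := (pvSpan_mem _ _ _).mp hy
  by_cases hg : generator = 0
  · subst hg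
    rw [show (0 : Int).toNat = 0 from rfl, pvClmul_zero_right, pvClmul_zero_right]
  · have hsz := PySem.Int.lt_two_pow_bitLength generator
    have habs : generator.natAbs = generator.toNat := by omega
    rw [habs] at hsz
    have hg1 : 1 ≤ generator.toNat := by omega
    have hsz1 : 1 ≤ PySem.Int.bitLength generator := by
      rcases Nat.eq_zero_or_pos (PySem.Int.bitLength generator) with h | h
      · rw [h] at hsz; simp at hsz; omega
      · exact h
    have hd : pvPolyDegree generator = (PySem.Int.bitLength generator : Int) - 1 := by
      simp [pvPolyDegree, hg]
    have hexp : (n - pvPolyDegree generator).toNat + PySem.Int.bitLength generator - 1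
        = n.toNat := by
      rw [hd] at hrn ⊢
      omega
    exact pvBits_inj n _ _ (hexp ▸ pvClmul_lt mx _ _ _ hsz1 hmx hsz)
      (hexp ▸ pvClmul_lt my _ _ _ hsz1 hmy hsz) hxy

-- ===== VERDICT (by name: the statement is the Claim_ definition above) =====
theorem generate_cyclic_code_spec : Claim_equal_generate_cyclic_code := by
  intro generator n hDom hPre
  obtain ⟨hg0, hrn⟩ := hPre
  unfold Spec_generate_cyclic_code
  show generate_cyclic_code generator n = generate_cyclic_code_alt generator n
  simp only [generate_cyclic_code, generate_cyclic_code_alt]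
  have hr : (if generator ≠ 0 then ((PySem.Int.bitLength generator : Nat) : Int) - 1 else -1)
      = pvPolyDegree generator := by
    by_cases h : generator = 0 <;> simp [pvPolyDegree, h]
  rw [hr]
  apply pvSorted_congr_perm
  apply (List.perm_ext_iff_of_nodup (PySem.Set.nodup_ofList _)
    (List.Nodup.map_on (pvSpanInj generator n hg0 hrn) (pvSpan_nodup _ _))).mpr
  intro t
  rw [PySem.Set.mem_ofList]
  simp only [List.mem_map, List.mem_range]
  constructor
  · rintro ⟨m, hm, rfl⟩
    refine ⟨pvClmul m generator.toNat, (pvSpan_mem _ _ _).mpr ⟨m, hm, rfl⟩, ?_⟩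
    rw [pvPolyMul_eq, pvClmul_comm]
    rfl
  · rintro ⟨c, hc, rfl⟩
    obtain ⟨m, hm, rfl⟩ := (pvSpan_mem _ _ _).mp hc
    refine ⟨m, hm, ?_⟩
    rw [pvPolyMul_eq, pvClmul_comm]
    rfl
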